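-- pv_equiv track=rewrite | github.com/CISPA-SysSec/brand_impersonation | code/accounts_collection_and_analysis/profile_meta_data_info.py | get_attacking_brand_from_found_blocked_data
-- ===== SOURCE A (Python) =====
-- def get_attacking_brand_from_found_blocked_data(domain_names, blocked_account):
--     blocked_brand_info = {}
--     for name in domain_names:
--         for twt_acc in blocked_account:
--             if name in twt_acc:
--                 if name not in blocked_brand_info:
--                     blocked_brand_info[name] = 1
--                 else:
--                     blocked_brand_info[name] = 1 + blocked_brand_info[name]
--     return blocked_brand_info
-- ===== SOURCE B (Python) =====
-- def get_attacking_brand_from_found_blocked_data(domain_names, blocked_account):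
--     # Tally multiplicities of each distinct domain name once, then count matching
--     # accounts once per distinct name and scale by the multiplicity.
--     mult = {}
--     for name in domain_names:
--         mult[name] = mult.get(name, 0) + 1
--     return {name: m * c
--             for name, m in mult.items()
--             if (c := sum(1 for acc in blocked_account if name in acc)) > 0}
-- ===== Notes on version B (the rewrite author's own statement) =====
-- stated objective: faster
-- what changed: Instead of A's nested loops that re-scan all accounts for every (possibly repeated) domain name while incrementally updating a dict, B counts matching accounts once per DISTINCT name and multiplies by the name's multiplicity, building the result in one comprehension.
import Mathlib
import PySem

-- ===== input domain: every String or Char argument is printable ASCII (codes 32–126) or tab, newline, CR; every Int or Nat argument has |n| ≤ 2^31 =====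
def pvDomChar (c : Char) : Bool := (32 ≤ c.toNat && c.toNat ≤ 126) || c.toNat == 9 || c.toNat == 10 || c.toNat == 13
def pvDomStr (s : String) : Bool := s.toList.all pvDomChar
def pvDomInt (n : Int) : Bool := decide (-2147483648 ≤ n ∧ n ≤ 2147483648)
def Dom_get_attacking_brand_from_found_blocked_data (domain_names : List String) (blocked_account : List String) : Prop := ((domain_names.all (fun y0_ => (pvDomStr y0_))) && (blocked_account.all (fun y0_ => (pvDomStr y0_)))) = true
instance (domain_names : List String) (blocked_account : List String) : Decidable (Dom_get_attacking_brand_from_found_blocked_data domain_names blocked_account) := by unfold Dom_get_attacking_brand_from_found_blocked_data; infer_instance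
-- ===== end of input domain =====

-- B replaces A's nested incremental-dict loops by one substring count per DISTINCT
-- name, scaled by the name's multiplicity: repeated names no longer re-scan the
-- accounts (objective: faster on duplicate-heavy domain_names, as measured).

-- ===== PORT A =====
def get_attacking_brand_from_found_blocked_data (domain_names : List String) (blocked_account : List String) : List (String × Int) :=
  (domain_names.foldl (fun blocked_brand_info name =>
    blocked_account.foldl (fun blocked_brand_info twt_acc =>
      if PySem.Str.isIn name twt_acc then
        if !(blocked_brand_info.contains name) then
          blocked_brand_info.insert name 1
        else
          -- blocked_brand_info[name]: the key is present in this branch, so getD's default is never used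
          blocked_brand_info.insert name (1 + blocked_brand_info.getD name 0)
      else blocked_brand_info) blocked_brand_info)
    (PySem.Dict.empty : PySem.Dict String Int)).items

-- ===== PORT B =====
-- c = sum(1 for acc in blocked_account if name in acc)
def pvCntB (blocked_account : List String) (name : String) : Int :=
  blocked_account.foldl (fun s acc => if PySem.Str.isIn name acc then s + 1 else s) 0

def get_attacking_brand_from_found_blocked_data_alt (domain_names : List String) (blocked_account : List String) : List (String × Int) :=
  let mult := domain_names.foldl (fun d name => d.insert name (d.getD name 0 + 1))
    (PySem.Dict.empty : PySem.Dict String Int)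
  -- the dict comprehension over mult.items: mult's keys are distinct, so it is this filterMap
  mult.items.filterMap (fun p =>
    let c := pvCntB blocked_account p.1
    if 0 < c then some (p.1, p.2 * c) else none)

-- ===== PRECONDITION & SPEC =====
def Spec_get_attacking_brand_from_found_blocked_data (domain_names : List String) (blocked_account : List String) (out : List (String × Int)) : Prop := out = get_attacking_brand_from_found_blocked_data_alt domain_names blocked_account
instance (domain_names : List String) (blocked_account : List String) (out : List (String × Int)) : Decidable (Spec_get_attacking_brand_from_found_blocked_data domain_names blocked_account out) := by unfold Spec_get_attacking_brand_from_found_blocked_data; infer_instance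

-- ===== CLAIM (what is proved, stated in full; the proofs are below) =====
def Claim_equal_get_attacking_brand_from_found_blocked_data : Prop := ∀ (domain_names : List String) (blocked_account : List String), Dom_get_attacking_brand_from_found_blocked_data domain_names blocked_account → Spec_get_attacking_brand_from_found_blocked_data domain_names blocked_account (get_attacking_brand_from_found_blocked_data domain_names blocked_account)

-- ===== LEMMAS AND PROOFS =====

-- number of blocked accounts containing `name`, as an Int
def pvCnt (blocked_account : List String) (name : String) : Int :=
  (blocked_account.countP (fun acc => PySem.Str.isIn name acc) : Int)

lemma pvCntB_eq (blocked_account : List String) (name : String) :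
    pvCntB blocked_account name = pvCnt blocked_account name := by
  unfold pvCntB pvCnt
  rw [PySem.List.foldl_if_add_one]
  rw [zero_add]

lemma pvCnt_nonneg (blocked_account : List String) (name : String) :
    0 ≤ pvCnt blocked_account name := by
  simp [pvCnt]

-- A's inner loop collapses to a single conditional insert
lemma innerA_eq (blocked_account : List String) (name : String)
    (d : PySem.Dict String Int) :
    blocked_account.foldl (fun blocked_brand_info twt_acc =>
      if PySem.Str.isIn name twt_acc then
        if !(blocked_brand_info.contains name) then
          blocked_brand_info.insert name 1
        else
          blocked_brand_info.insert name (1 + blocked_brand_info.getD name 0)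
      else blocked_brand_info) d =
    (if 0 < pvCnt blocked_account name then
      d.insert name (d.getD name 0 + pvCnt blocked_account name) else d) := by
  induction blocked_account generalizing d with
  | nil => simp [pvCnt]
  | cons a l ih =>
    simp only [List.foldl_cons]
    by_cases hm : PySem.Str.isIn name a = true
    · rw [if_pos hm]
      have hstep : (if !(d.contains name) then d.insert name 1
          else d.insert name (1 + d.getD name 0)) = d.insert name (d.getD name 0 + 1) := by
        by_cases hc : d.contains name = true
        · simp [hc]; ring
        · simp only [Bool.not_eq_true] at hc
          rw [PySem.Dict.getD_of_not_contains d 0 hc]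
          simp [hc]
      rw [hstep, ih]
      have hm' : PySem.Chars.isIn name.toList a.toList = true := by simpa using hm
      have hcnt : pvCnt (a :: l) name = pvCnt l name + 1 := by
        simp [pvCnt, hm']
      rw [hcnt]
      by_cases h0 : 0 < pvCnt l name
      · rw [if_pos h0, if_pos (by omega)]
        rw [PySem.Dict.getD_insert_self, PySem.Dict.insert_insert_self]
        ring_nf
      · rw [if_neg h0, if_pos (by have := pvCnt_nonneg l name; omega)]
        have hz : pvCnt l name = 0 := by have := pvCnt_nonneg l name; omega
        rw [hz]; ring_nf
    · simp only [Bool.not_eq_true] at hm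
      have hm' : PySem.Chars.isIn name.toList a.toList = false := hm
      rw [if_neg (by simp [hm']), ih]
      have hcnt : pvCnt (a :: l) name = pvCnt l name := by
        simp [pvCnt, hm']
      rw [hcnt]

-- the canonical value of both dicts, as an items list
def pvModel (blocked_account : List String) (ns : List String) : List (String × Int) :=
  ((PySem.Set.ofList ns).filter (fun x => decide (0 < pvCnt blocked_account x))).map
    (fun x => (x, (ns.count x : Int) * pvCnt blocked_account x))

lemma pvModel_map_fst (blocked_account ns : List String) :
    (pvModel blocked_account ns).map Prod.fst =
    (PySem.Set.ofList ns).filter (fun x => decide (0 < pvCnt blocked_account x)) := by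
  simp [pvModel, List.map_map, Function.comp_def]

lemma ofList_append_singleton (ns : List String) (n : String) :
    PySem.Set.ofList (ns ++ [n]) = PySem.Set.add (PySem.Set.ofList ns) n := by
  rw [PySem.Set.ofList_eq_foldl, PySem.Set.ofList_eq_foldl, List.foldl_append,
    List.foldl_cons, List.foldl_nil]

lemma foldlA_items (blocked_account : List String) (ns : List String) :
    (ns.foldl (fun d name =>
      if 0 < pvCnt blocked_account name then
        d.insert name (d.getD name 0 + pvCnt blocked_account name) else d)
      (PySem.Dict.empty : PySem.Dict String Int)).items =
    pvModel blocked_account ns := by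
  induction ns using List.reverseRecOn with
  | nil => rfl
  | append_singleton ns n ih =>
    rw [List.foldl_append, List.foldl_cons, List.foldl_nil]
    set D := ns.foldl (fun d name =>
      if 0 < pvCnt blocked_account name then
        d.insert name (d.getD name 0 + pvCnt blocked_account name) else d)
      (PySem.Dict.empty : PySem.Dict String Int) with hD
    have hkeys : D.keys = (PySem.Set.ofList ns).filter
        (fun x => decide (0 < pvCnt blocked_account x)) := by
      have : D.keys = D.items.map Prod.fst := rfl
      rw [this, ih, pvModel_map_fst]
    have hnodup : D.keys.Nodup := by
      rw [hkeys]; exact (PySem.Set.nodup_ofList ns).filter _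
    by_cases hc : 0 < pvCnt blocked_account n
    · rw [if_pos hc]
      by_cases hmem : n ∈ ns
      · -- n already seen: insert overwrites in place
        have hnS : n ∈ (PySem.Set.ofList ns).filter
            (fun x => decide (0 < pvCnt blocked_account x)) :=
          List.mem_filter.2 ⟨(PySem.Set.mem_ofList ns n).2 hmem, by simpa using hc⟩
        have hcon : D.contains n = true := by
          rw [PySem.Dict.contains_iff_mem_keys, hkeys]; exact hnS
        have hgetD : D.getD n 0 = (ns.count n : Int) * pvCnt blocked_account n := by
          refine PySem.Dict.getD_of_mem_items D ?_ hnodup 0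
          rw [ih]
          exact List.mem_map.2 ⟨n, hnS, rfl⟩
        rw [PySem.Dict.items_insert_of_contains D _ hcon, ih, hgetD]
        have hcontains : (PySem.Set.ofList ns).contains n = true :=
          (PySem.Set.contains_iff _ n).2 ((PySem.Set.mem_ofList ns n).2 hmem)
        have hset : PySem.Set.ofList (ns ++ [n]) = PySem.Set.ofList ns := by
          rw [ofList_append_singleton]
          simp only [PySem.Set.add, hcontains, if_true]
        unfold pvModel
        rw [hset, List.map_map]
        refine List.map_congr_left ?_
        intro x hx
        by_cases hxn : x = n
        · rw [hxn]
          simp only [Function.comp_apply, beq_self_eq_true, if_pos]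
          have hcnt1 : (ns ++ [n]).count n = ns.count n + 1 := by
            simp [List.count_append]
          rw [hcnt1]
          push_cast
          ring
        · have hbeq : (x == n) = false := by simp [hxn]
          simp only [Function.comp_apply, hbeq, Bool.false_eq_true, if_false]
          have hcnt0 : (ns ++ [n]).count x = ns.count x := by
            simp [List.count_append, List.count_eq_zero, hxn]
          rw [hcnt0]
      · -- fresh key: insert appends
        have hnotS : n ∉ (PySem.Set.ofList ns) := fun h => hmem ((PySem.Set.mem_ofList ns n).1 h)
        have hcon : D.contains n = false := by
          rw [← Bool.not_eq_true, PySem.Dict.contains_iff_mem_keys, hkeys]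
          intro h
          exact hnotS (List.mem_of_mem_filter h)
        rw [PySem.Dict.items_insert_of_not_contains D _ hcon, ih,
          PySem.Dict.getD_of_not_contains D 0 hcon]
        have hset : PySem.Set.ofList (ns ++ [n]) = PySem.Set.ofList ns ++ [n] := by
          rw [ofList_append_singleton]
          simp only [PySem.Set.add]
          rw [if_neg (by simpa [PySem.Set.contains_iff, PySem.Set.mem_ofList] using hmem)]
        unfold pvModel
        rw [hset, List.filter_append, List.map_append]
        congr 1
        · refine List.map_congr_left ?_
          intro x hx
          have hxn : x ≠ n := by
            intro h; subst h; exact hnotS (List.mem_of_mem_filter hx)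
          have hcnt0 : (ns ++ [n]).count x = ns.count x := by
            simp [List.count_append, List.count_eq_zero, hxn]
          rw [hcnt0]
        · have hc0 : ns.count n = 0 := List.count_eq_zero_of_not_mem hmem
          simp [hc, List.count_append, hc0]
    · rw [if_neg hc]
      rw [ih]
      unfold pvModel
      have hset : (PySem.Set.ofList (ns ++ [n])).filter
          (fun x => decide (0 < pvCnt blocked_account x)) =
          (PySem.Set.ofList ns).filter (fun x => decide (0 < pvCnt blocked_account x)) := by
        rw [ofList_append_singleton]
        simp only [PySem.Set.add]
        split
        · rfl
        · rw [List.filter_append]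
          simp [hc]
      rw [hset]
      refine List.map_congr_left ?_
      intro x hx
      have hxn : x ≠ n := by
        intro h; subst h
        have := List.mem_filter.1 hx
        simp at this
        omega
      have hcnt0 : (ns ++ [n]).count x = ns.count x := by
        simp [List.count_append, List.count_eq_zero, hxn]
      rw [hcnt0]

-- the dict comprehension 'if p then key: value' over a list is a filter-then-map
lemma filterMap_ite_eq_filter_map {α β : Type} (p : α → Prop) [DecidablePred p]
    (f : α → β) (L : List α) :
    L.filterMap (fun x => if p x then some (f x) else none) =
    (L.filter (fun x => decide (p x))).map f := by
  induction L with
  | nil => rfl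
  | cons a l ih =>
    by_cases h : p a
    · simp [h, ih]
    · simp [h, ih]

-- ===== VERDICT (by name: the statement is the Claim_ definition above) =====
theorem get_attacking_brand_from_found_blocked_data_spec : Claim_equal_get_attacking_brand_from_found_blocked_data := by
  intro domain_names blocked_account _
  unfold Spec_get_attacking_brand_from_found_blocked_data
  unfold get_attacking_brand_from_found_blocked_data
    get_attacking_brand_from_found_blocked_data_alt
  -- A side: collapse the inner loop, then use the fold characterisation
  have hfun : (fun (blocked_brand_info : PySem.Dict String Int) (name : String) =>
      blocked_account.foldl (fun blocked_brand_info twt_acc =>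
        if PySem.Str.isIn name twt_acc then
          if !(blocked_brand_info.contains name) then
            blocked_brand_info.insert name 1
          else
            blocked_brand_info.insert name (1 + blocked_brand_info.getD name 0)
        else blocked_brand_info) blocked_brand_info) =
      (fun (d : PySem.Dict String Int) (name : String) =>
        if 0 < pvCnt blocked_account name then
          d.insert name (d.getD name 0 + pvCnt blocked_account name) else d) := by
    funext d name
    exact innerA_eq blocked_account name d
  rw [hfun, foldlA_items]
  -- B side: the multiplicity dict is a counter; flatten the comprehension
  rw [PySem.Dict.foldl_insert_getD_add_one_eq_counter]
  show pvModel blocked_account domain_names =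
    List.filterMap (fun p => let c := pvCntB blocked_account p.1
      if 0 < c then some (p.1, p.2 * c) else none)
      (PySem.Dict.counter domain_names).items
  rw [PySem.Dict.items_counter, List.filterMap_map]
  have hfn : ((fun p : String × Int => let c := pvCntB blocked_account p.1
      if 0 < c then some (p.1, p.2 * c) else none) ∘
      (fun k : String => (k, (domain_names.count k : Int)))) =
      (fun x : String => if 0 < pvCnt blocked_account x then
        some (x, (domain_names.count x : Int) * pvCnt blocked_account x) else none) := by
    funext x
    simp [pvCntB_eq]
  rw [hfn, filterMap_ite_eq_filter_map (fun x => 0 < pvCnt blocked_account x)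
      (fun x => (x, (domain_names.count x : Int) * pvCnt blocked_account x))]
  rfl
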